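-- pv_equiv track=rewrite | github.com/DulmievMusa/Tic_tak_toe_project | funcs/game_funcs.py | add_indexes_to_matrix
-- ===== SOURCE A (Python) =====
-- def add_indexes_to_matrix(matrix):
--     mat = []
--     index = -1
--     for row in matrix:
--         sp = []
--         for elem in row:
--             index += 1
--             sp.append((elem, str(index)))
--         mat.append(sp.copy())
--     return mat
-- ===== SOURCE B (Python) =====
-- def add_indexes_to_matrix(matrix):
--     # Different decomposition: pair ALL elements with their global index in one
--     # flat enumerate pass, then split the flat list back into rows by length.
--     flat = [(elem, str(i)) for i, elem in enumerate(x for row in matrix for x in row)]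
--     out = []
--     pos = 0
--     for row in matrix:
--         n = len(row)
--         out.append(flat[pos:pos + n])
--         pos += n
--     return out
-- ===== Notes on version B (the rewrite author's own statement) =====
-- stated objective: alternative
-- what changed: Replaces the global mutable counter threaded through nested loops by a single flat enumerate over the flattened matrix followed by re-splitting the flat pair list into rows via take/drop by row lengths.
import Mathlib
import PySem

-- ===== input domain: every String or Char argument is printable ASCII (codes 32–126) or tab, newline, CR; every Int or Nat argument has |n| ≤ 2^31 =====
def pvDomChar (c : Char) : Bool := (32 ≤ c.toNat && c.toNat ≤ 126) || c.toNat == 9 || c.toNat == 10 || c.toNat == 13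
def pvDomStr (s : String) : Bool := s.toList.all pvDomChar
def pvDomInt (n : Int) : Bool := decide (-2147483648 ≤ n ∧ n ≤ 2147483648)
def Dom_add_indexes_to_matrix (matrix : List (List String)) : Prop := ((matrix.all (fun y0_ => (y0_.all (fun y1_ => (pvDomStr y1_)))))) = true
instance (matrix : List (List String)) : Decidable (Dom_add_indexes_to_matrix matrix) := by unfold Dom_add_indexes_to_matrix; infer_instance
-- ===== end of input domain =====

-- B replaces A's global mutable counter threaded through nested loops by one flat
-- enumerate over the flattened matrix followed by re-splitting into rows (alternative decomposition).


-- ===== PORT A =====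
-- A: nested loops appending to `mat`/`sp`, one global Int counter starting at -1.
def add_indexes_to_matrix (matrix : List (List String)) : List (List (String × String)) :=
  let st := matrix.foldl
    (fun (acc : List (List (String × String)) × Int) row =>
      let inner := row.foldl
        (fun (p : List (String × String) × Int) elem =>
          let index := p.2 + 1
          (p.1 ++ [(elem, PySem.Int.toStr index)], index))
        ([], acc.2)
      (acc.1 ++ [inner.1], inner.2))
    ([], -1)
  st.1

-- ===== PORT B =====
-- B helper: out.append(flat[pos:pos+n]); pos += n  per row
def pvSplitRows (rows : List (List String)) (flat : List (String × String)) (pos : Nat) : List (List (String × String)) :=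
  match rows with
  | [] => []
  | row :: rest =>
    PySem.List.slice flat (some (pos : Int)) (some ((pos : Int) + (row.length : Int)))
      :: pvSplitRows rest flat (pos + row.length)

def add_indexes_to_matrix_alt (matrix : List (List String)) : List (List (String × String)) :=
  let flat := (PySem.List.enumerate matrix.flatten).map (fun p => (p.2, PySem.Int.toStr p.1))
  pvSplitRows matrix flat 0

-- ===== PRECONDITION & SPEC =====
def Spec_add_indexes_to_matrix (matrix : List (List String)) (out : List (List (String × String))) : Prop := out = add_indexes_to_matrix_alt matrix
instance (matrix : List (List String)) (out : List (List (String × String))) : Decidable (Spec_add_indexes_to_matrix matrix out) := by unfold Spec_add_indexes_to_matrix; infer_instance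

-- ===== CLAIM (what is proved, stated in full; the proofs are below) =====
def Claim_equal_add_indexes_to_matrix : Prop := ∀ (matrix : List (List String)), Dom_add_indexes_to_matrix matrix → Spec_add_indexes_to_matrix matrix (add_indexes_to_matrix matrix)

-- ===== LEMMAS AND PROOFS =====

-- the common normal form: row `row` indexed from `off`
def pvRowP (off : Int) : List String → List (String × String)
  | [] => []
  | e :: es => (e, PySem.Int.toStr off) :: pvRowP (off + 1) es

def pvG (off : Int) : List (List String) → List (List (String × String))
  | [] => []
  | r :: rs => pvRowP off r :: pvG (off + r.length) rs

theorem pvRowP_length (off : Int) (row : List String) : (pvRowP off row).length = row.length := by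
  induction row generalizing off with
  | nil => rfl
  | cons e es ih => simp [pvRowP, ih]

-- A's inner fold
theorem A_inner (row : List String) : ∀ (acc : List (String × String)) (i : Int),
    row.foldl (fun (p : List (String × String) × Int) elem =>
        let index := p.2 + 1
        (p.1 ++ [(elem, PySem.Int.toStr index)], index)) (acc, i)
      = (acc ++ pvRowP (i + 1) row, i + row.length) := by
  induction row with
  | nil => intro acc i; simp [pvRowP]
  | cons e es ih =>
    intro acc i
    simp only [List.foldl_cons]
    rw [ih]
    simp [pvRowP]
    omega

-- A's outer fold
theorem A_outer (rows : List (List String)) : ∀ (acc : List (List (String × String))) (i : Int),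
    rows.foldl (fun (acc : List (List (String × String)) × Int) row =>
        let inner := row.foldl
          (fun (p : List (String × String) × Int) elem =>
            let index := p.2 + 1
            (p.1 ++ [(elem, PySem.Int.toStr index)], index))
          ([], acc.2)
        (acc.1 ++ [inner.1], inner.2)) (acc, i)
      = (acc ++ pvG (i + 1) rows, i + rows.flatten.length) := by
  induction rows with
  | nil => intro acc i; simp [pvG]
  | cons r rs ih =>
    intro acc i
    simp only [List.foldl_cons]
    rw [A_inner, ih]
    simp only [pvG, List.flatten_cons, List.length_append, List.nil_append,
      List.append_assoc, List.singleton_append]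
    rw [show i + (r.length : Int) + 1 = i + 1 + r.length by ring]
    rw [show i + ((r.length + rs.flatten.length : Nat) : Int) = i + r.length + rs.flatten.length by push_cast; ring]

theorem A_eq_G (matrix : List (List String)) : add_indexes_to_matrix matrix = pvG 0 matrix := by
  unfold add_indexes_to_matrix
  rw [A_outer]
  norm_num

-- B side: the flat enumerate of an appended list splits
theorem flat_append (xs ys : List String) (s : Int) :
    (PySem.List.enumerate (xs ++ ys) s).map (fun p => (p.2, PySem.Int.toStr p.1))
      = (PySem.List.enumerate xs s).map (fun p => (p.2, PySem.Int.toStr p.1))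
        ++ (PySem.List.enumerate ys (s + xs.length)).map (fun p => (p.2, PySem.Int.toStr p.1)) := by
  rw [PySem.List.enumerate_append]; simp

theorem flat_eq_rowP (xs : List String) (s : Int) :
    (PySem.List.enumerate xs s).map (fun p => (p.2, PySem.Int.toStr p.1)) = pvRowP s xs := by
  induction xs generalizing s with
  | nil => simp [PySem.List.enumerate_nil, pvRowP]
  | cons e es ih => simp [PySem.List.enumerate_cons, pvRowP, ih]

theorem B_eq_G (rows : List (List String)) : ∀ (pre : List (String × String)) (s : Int),
    pvSplitRows rows (pre ++ (PySem.List.enumerate rows.flatten s).map (fun p => (p.2, PySem.Int.toStr p.1))) pre.length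
      = pvG s rows := by
  induction rows with
  | nil => intro pre s; rfl
  | cons r rs ih =>
    intro pre s
    simp only [List.flatten_cons]
    rw [flat_append, flat_eq_rowP]
    simp only [pvSplitRows, pvG, PySem.List.slice_natCast_add]
    rw [List.drop_left, List.take_left' (pvRowP_length s r)]
    have h : pre.length + r.length = (pre ++ pvRowP s r).length := by
      simp [pvRowP_length]
    rw [show pre ++ (pvRowP s r ++ (PySem.List.enumerate rs.flatten (s + ↑r.length)).map (fun p => (p.2, PySem.Int.toStr p.1)))
          = (pre ++ pvRowP s r) ++ (PySem.List.enumerate rs.flatten (s + ↑r.length)).map (fun p => (p.2, PySem.Int.toStr p.1)) by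
        simp [List.append_assoc], h, ih]

-- ===== VERDICT (by name: the statement is the Claim_ definition above) =====
theorem add_indexes_to_matrix_spec : Claim_equal_add_indexes_to_matrix := by
  intro matrix _
  unfold Spec_add_indexes_to_matrix add_indexes_to_matrix_alt
  rw [A_eq_G]
  exact (B_eq_G matrix [] 0).symm
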